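-- pv_equiv track=rewrite | github.com/rafaelagehrke/beecrowd | 2450.py | verificar_matriz_escada
-- ===== SOURCE A (Python) =====
-- def verificar_matriz_escada(matriz):
--     num_linhas = len(matriz)
--     num_colunas = len(matriz[0])
--     max_zeros = 0
--     valido = True
--     for linha in range(num_linhas):
--         zeros_consecutivos = 0
--         consecutivos = True
--         for coluna in range(num_colunas):
--             elemento = matriz[linha][coluna]
--             if elemento == 0 and consecutivos:
--                 zeros_consecutivos += 1
--             else:
--                 consecutivos = False
--         if linha != 0:
--             if (zeros_consecutivos > max_zeros or (zeros_consecutivos == max_zeros and zeros_consecutivos == num_colunas)) and valido: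
--                 max_zeros = zeros_consecutivos
--             else:
--                 max_zeros = 0
--                 valido = False
--         else:
--             max_zeros = zeros_consecutivos
--     if max_zeros:
--         return "S"
--     else:
--         return "N"
-- ===== SOURCE B (Python) =====
-- def verificar_matriz_escada(matriz):
--     num_colunas = len(matriz[0])
--     z = []
--     for row in matriz:
--         c = 0
--         while c < num_colunas and row[c] == 0:
--             c += 1
--         z.append(c)
--     abaixo = [v for v in z if v != num_colunas]
--     if z == sorted(z) and len(abaixo) == len(set(abaixo)) and z[-1] != 0:
--         return "S"
--     return "N"
-- ===== Notes on version B (the rewrite author's own statement) =====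
-- stated objective: alternative
-- what changed: Instead of A's interleaved max/valido state machine over adjacent rows, B computes each row's leading-zero count with an early-stopping while loop and then decides the verdict globally: the count list must equal its sorted copy, counts below the full width must be pairwise distinct (compared via set cardinality), and the last count must be nonzero.
import Mathlib
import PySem

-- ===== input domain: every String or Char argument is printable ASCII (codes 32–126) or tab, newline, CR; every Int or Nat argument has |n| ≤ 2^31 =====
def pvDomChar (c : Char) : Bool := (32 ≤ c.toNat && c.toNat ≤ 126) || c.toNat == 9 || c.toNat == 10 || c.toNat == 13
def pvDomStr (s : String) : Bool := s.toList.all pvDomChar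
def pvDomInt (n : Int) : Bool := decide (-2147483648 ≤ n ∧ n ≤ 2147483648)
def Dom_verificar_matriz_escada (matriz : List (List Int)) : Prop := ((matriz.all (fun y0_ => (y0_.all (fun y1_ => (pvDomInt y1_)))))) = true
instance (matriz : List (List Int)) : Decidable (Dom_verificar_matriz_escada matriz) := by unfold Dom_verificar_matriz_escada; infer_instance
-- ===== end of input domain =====

-- B replaces A's interleaved max/valido state machine by a global check on the list of
-- per-row leading-zero counts: sortedness, distinctness of below-full-width counts via a set,
-- and a nonzero last count; same asymptotic cost up to the sort, objective "alternative".

-- ===== PORT A =====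
def verificar_matriz_escada (matriz : List (List Int)) : String :=
  let num_linhas : Int := (matriz.length : Int)
  let num_colunas : Int := ((PySem.List.pyGetD matriz 0 []).length : Int)
  let st := (PySem.List.pyRange 0 num_linhas 1).foldl
    (fun (st : Int × Bool) linha =>
      let inner := (PySem.List.pyRange 0 num_colunas 1).foldl
        (fun (p : Int × Bool) coluna =>
          let elemento := PySem.List.pyGetD (PySem.List.pyGetD matriz linha []) coluna 0
          if elemento = 0 ∧ p.2 = true then (p.1 + 1, p.2) else (p.1, false))
        (0, true)
      let zeros_consecutivos := inner.1
      if linha ≠ 0 then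
        if (zeros_consecutivos > st.1 ∨ (zeros_consecutivos = st.1 ∧ zeros_consecutivos = num_colunas)) ∧ st.2 = true
        then (zeros_consecutivos, st.2)
        else (0, false)
      else (zeros_consecutivos, st.2))
    (0, true)
  if st.1 ≠ 0 then "S" else "N"

-- ===== PORT B =====
-- the `while c < num_colunas and row[c] == 0: c += 1` loop of Source B,
-- with a fuel argument (one unit per remaining column) that only makes it total
def bRowCount (row : List Int) (n : Int) : Int → Nat → Int
  | c, 0 => c
  | c, k + 1 => if c < n ∧ PySem.List.pyGetD row c 0 = 0 then bRowCount row n (c + 1) k else c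

def verificar_matriz_escada_alt (matriz : List (List Int)) : String :=
  let num_colunas : Int := ((PySem.List.pyGetD matriz 0 []).length : Int)
  let z : List Int := matriz.foldl (fun acc row => acc ++ [bRowCount row num_colunas 0 num_colunas.toNat]) []
  let abaixo : List Int := z.filter (fun v => decide (v ≠ num_colunas))
  if z = PySem.List.sorted z (fun x => x) false
     ∧ (abaixo.length : Int) = ((PySem.Set.ofList abaixo).length : Int)
     ∧ PySem.List.pyGetD z (-1) 0 ≠ 0
  then "S" else "N"

-- ===== PRECONDITION & SPEC =====
-- Pre_ excludes exactly the inputs where A raises IndexError: the empty matrix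
-- (matriz[0]) and matrices with a row shorter than the first row (matriz[linha][coluna]).
def Pre_verificar_matriz_escada (matriz : List (List Int)) : Prop :=
  matriz ≠ [] ∧ ∀ row ∈ matriz, (matriz.headD []).length ≤ row.length
instance (matriz : List (List Int)) : Decidable (Pre_verificar_matriz_escada matriz) := by unfold Pre_verificar_matriz_escada; infer_instance
def pvWitness_verificar_matriz_escada : List (List Int) := [[0, 1], [0, 0]]

def Spec_verificar_matriz_escada (matriz : List (List Int)) (out : String) : Prop := out = verificar_matriz_escada_alt matriz
instance (matriz : List (List Int)) (out : String) : Decidable (Spec_verificar_matriz_escada matriz out) := by unfold Spec_verificar_matriz_escada; infer_instance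

-- ===== CLAIM (what is proved, stated in full; the proofs are below) =====
def Claim_equal_verificar_matriz_escada : Prop := ∀ (matriz : List (List Int)), Dom_verificar_matriz_escada matriz → Pre_verificar_matriz_escada matriz → Spec_verificar_matriz_escada matriz (verificar_matriz_escada matriz)

-- ===== LEMMAS AND PROOFS =====

-- leading-zero count of a list, as an Int
def lzInt (ys : List Int) : Int := ((ys.takeWhile (fun v => v == 0)).length : Int)

-- A's inner loop step, abstracted over the element
def stepI (p : Int × Bool) (v : Int) : Int × Bool :=
  if v = 0 ∧ p.2 = true then (p.1 + 1, p.2) else (p.1, false)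

-- A's outer loop step (for linha ≠ 0), abstracted over the row's zero count
def stepO (n : Int) (st : Int × Bool) (zc : Int) : Int × Bool :=
  if (zc > st.1 ∨ (zc = st.1 ∧ zc = n)) ∧ st.2 = true then (zc, st.2) else (0, false)

-- the staircase chain condition over successive counts
def chainOK (n : Int) : Int → List Int → Bool
  | _, [] => true
  | m, z :: zs => (decide (z > m ∨ (z = m ∧ m = n))) && chainOK n z zs

-- the step relation, rewritten symmetrically (pointwise equal to chainOK's test, and transitive)
def stepRel (n a b : Int) : Prop := a < b ∨ (a = n ∧ b = n)

lemma innerFalse (ys : List Int) (c : Int) : ys.foldl stepI (c, false) = (c, false) := by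
  induction ys generalizing c with
  | nil => rfl
  | cons y ys ih => simp [stepI, ih]

lemma innerTrue (ys : List Int) (c : Int) :
    ys.foldl stepI (c, true) = (c + lzInt ys, ys.all (fun v => v == 0)) := by
  induction ys generalizing c with
  | nil => simp [lzInt]
  | cons y ys ih =>
    by_cases hy : y = 0
    · subst hy
      simp only [List.foldl_cons, stepI]
      rw [if_pos ⟨trivial, trivial⟩, ih]
      simp [lzInt]
      omega
    · simp only [List.foldl_cons, stepI]
      rw [if_neg (by simp [hy]), innerFalse]
      simp [lzInt, hy]

lemma foldlFalse (n : Int) (zs : List Int) : zs.foldl (stepO n) (0, false) = (0, false) := by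
  induction zs with
  | nil => rfl
  | cons z zs ih => simpa [stepO] using ih

lemma foldlTrue (n : Int) (zs : List Int) (m : Int) :
    zs.foldl (stepO n) (m, true) =
      if chainOK n m zs then ((m :: zs).getLast (by simp), true) else (0, false) := by
  induction zs generalizing m with
  | nil => simp [chainOK]
  | cons z zs ih =>
    by_cases hc : z > m ∨ (z = m ∧ m = n)
    · have hc' : z > m ∨ (z = m ∧ z = n) := by omega
      simp only [List.foldl_cons, stepO]
      rw [if_pos ⟨hc', trivial⟩, ih]
      simp [chainOK, hc]
    · have hc' : ¬ (z > m ∨ (z = m ∧ z = n)) := by omega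
      simp only [List.foldl_cons, stepO]
      rw [if_neg (by simpa using hc'), foldlFalse]
      simp [chainOK, hc]

lemma inner_eval (row : List Int) (n : Nat) (h : n ≤ row.length) :
    (PySem.List.pyRange 0 (n : Int)).foldl
      (fun (p : Int × Bool) coluna =>
        if PySem.List.pyGetD row coluna 0 = 0 ∧ p.2 = true then (p.1 + 1, p.2) else (p.1, false))
      (0, true)
    = ((row.take n).foldl stepI (0, true)) := by
  have hlen : ((row.take n).length : Int) = (n : Int) := by
    simp [List.length_take, h]
  rw [show (n : Int) = ((row.take n).length : Int) from hlen.symm]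
  have hcongr : ∀ (acc : Int × Bool), ∀ j ∈ PySem.List.pyRange 0 ((row.take n).length : Int),
      (if PySem.List.pyGetD row j 0 = 0 ∧ acc.2 = true then (acc.1 + 1, acc.2) else (acc.1, false))
        = stepI acc (PySem.List.pyGetD (row.take n) j 0) := by
    intro acc j hj
    rw [PySem.List.mem_pyRange_one] at hj
    have hj2 : j < ((row.take n).length : Int) := hj.2
    have hjn : j.toNat < (row.take n).length := by omega
    have hjr : j.toNat < row.length := by
      have h2 := List.length_take_le n row
      omega
    rw [PySem.List.pyGetD_eq_getElem row 0 hj.1 (by omega),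
        PySem.List.pyGetD_eq_getElem (row.take n) 0 hj.1 (by omega)]
    simp [stepI, List.getElem_take]
  rw [PySem.List.foldl_congr_mem _ _ _ _ hcongr]
  simpa using PySem.List.foldl_pyRange_pyGetD' (row.take n) (0 : Int) stepI ((0 : Int), true) (a := 0) le_rfl

-- the per-row leading-zero count both programs compute under Pre_
def zcount (n : Nat) (row : List Int) : Int := lzInt (row.take n)

lemma A_eval (r0 : List Int) (rest : List (List Int))
    (hall : ∀ row ∈ (r0 :: rest), r0.length ≤ row.length) :
    verificar_matriz_escada (r0 :: rest) =
      (if (List.foldl (stepO (r0.length : Int)) (zcount r0.length r0, true)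
              (rest.map (zcount r0.length))).1 ≠ 0
       then "S" else "N") := by
  have hcol : PySem.List.pyGetD (r0 :: rest) 0 ([] : List Int) = r0 :=
    PySem.List.pyGetD_zero_cons r0 rest []
  simp only [verificar_matriz_escada, hcol]
  rw [show ((r0 :: rest).length : Int) = (rest.length : Int) + 1 by push_cast [List.length_cons]; ring]
  rw [PySem.List.pyRange_one_cons (a := 0) (b := (rest.length : Int) + 1) (by omega)]
  simp only [List.foldl_cons, hcol]
  rw [inner_eval r0 r0.length le_rfl, innerTrue]
  rw [if_neg (show ¬ ((0 : Int) ≠ 0) by omega)]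
  simp only [zero_add]
  have hcongr : ∀ (st : Int × Bool), ∀ linha ∈ PySem.List.pyRange 1 ((rest.length : Int) + 1),
      (if linha ≠ 0 then
         if (((PySem.List.pyRange 0 (r0.length : Int)).foldl
               (fun (p : Int × Bool) coluna =>
                 if PySem.List.pyGetD (PySem.List.pyGetD (r0 :: rest) linha []) coluna 0 = 0 ∧ p.2 = true
                 then (p.1 + 1, p.2) else (p.1, false)) (0, true)).1 > st.1 ∨
             (((PySem.List.pyRange 0 (r0.length : Int)).foldl
               (fun (p : Int × Bool) coluna =>
                 if PySem.List.pyGetD (PySem.List.pyGetD (r0 :: rest) linha []) coluna 0 = 0 ∧ p.2 = true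
                 then (p.1 + 1, p.2) else (p.1, false)) (0, true)).1 = st.1 ∧
              ((PySem.List.pyRange 0 (r0.length : Int)).foldl
               (fun (p : Int × Bool) coluna =>
                 if PySem.List.pyGetD (PySem.List.pyGetD (r0 :: rest) linha []) coluna 0 = 0 ∧ p.2 = true
                 then (p.1 + 1, p.2) else (p.1, false)) (0, true)).1 = (r0.length : Int))) ∧ st.2 = true
         then (((PySem.List.pyRange 0 (r0.length : Int)).foldl
               (fun (p : Int × Bool) coluna =>
                 if PySem.List.pyGetD (PySem.List.pyGetD (r0 :: rest) linha []) coluna 0 = 0 ∧ p.2 = true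
                 then (p.1 + 1, p.2) else (p.1, false)) (0, true)).1, st.2)
         else (0, false)
       else (((PySem.List.pyRange 0 (r0.length : Int)).foldl
               (fun (p : Int × Bool) coluna =>
                 if PySem.List.pyGetD (PySem.List.pyGetD (r0 :: rest) linha []) coluna 0 = 0 ∧ p.2 = true
                 then (p.1 + 1, p.2) else (p.1, false)) (0, true)).1, st.2))
      = stepO (r0.length : Int) st (zcount r0.length (PySem.List.pyGetD (r0 :: rest) linha [])) := by
    intro st linha hl
    rw [PySem.List.mem_pyRange_one] at hl
    have hmem : PySem.List.pyGetD (r0 :: rest) linha [] ∈ (r0 :: rest) := by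
      apply PySem.List.pyGetD_mem
      simp only [PySem.Raise.InRange, List.length_cons]
      push_cast
      omega
    have hlen : r0.length ≤ (PySem.List.pyGetD (r0 :: rest) linha []).length := hall _ hmem
    rw [inner_eval _ r0.length hlen, innerTrue]
    rw [if_pos (show linha ≠ 0 by omega)]
    simp only [stepO, zcount, zero_add]
  rw [PySem.List.foldl_congr_mem _ _ _ _ hcongr]
  rw [show ((rest.length : Int) + 1) = ((r0 :: rest).length : Int) by push_cast [List.length_cons]; ring]
  rw [PySem.List.foldl_pyRange_pyGetD' (r0 :: rest) ([] : List Int)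
        (fun st row => stepO (r0.length : Int) st (zcount r0.length row)) _ (a := 1) (by omega)]
  rw [← List.foldl_map]
  simp [lzInt, zcount]

-- B's while loop computes the leading-zero count of the first n cells
lemma bRowCount_aux (row : List Int) (n : Int) (hn : n ≤ (row.length : Int)) :
    ∀ (k : Nat) (c : Int), 0 ≤ c → (n - c).toNat = k →
      bRowCount row n c k = c + lzInt ((row.drop c.toNat).take k) := by
  intro k
  induction k with
  | zero =>
    intro c hc0 hk
    simp [bRowCount, lzInt]
  | succ k ih =>
    intro c hc0 hk
    have hclt : c < n := by omega
    have hcr : c.toNat < row.length := by omega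
    have hget : PySem.List.pyGetD row c 0 = row[c.toNat] :=
      PySem.List.pyGetD_eq_getElem row 0 hc0 (by omega)
    have hdrop : row.drop c.toNat = row[c.toNat] :: row.drop (c.toNat + 1) :=
      List.drop_eq_getElem_cons hcr
    by_cases he : row[c.toNat] = 0
    · rw [show bRowCount row n c (k + 1)
          = if c < n ∧ PySem.List.pyGetD row c 0 = 0 then bRowCount row n (c + 1) k else c from rfl,
        if_pos ⟨hclt, by rw [hget]; exact he⟩]
      rw [ih (c + 1) (by omega) (by omega)]
      rw [show (c + 1).toNat = c.toNat + 1 by omega]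
      rw [hdrop]
      simp only [List.take_succ_cons, lzInt, List.takeWhile_cons, he]
      simp only [beq_self_eq_true, if_true, List.length_cons]
      push_cast
      ring
    · rw [show bRowCount row n c (k + 1)
          = if c < n ∧ PySem.List.pyGetD row c 0 = 0 then bRowCount row n (c + 1) k else c from rfl,
        if_neg (by rw [hget]; simp [he])]
      rw [hdrop]
      simp [lzInt, List.takeWhile_cons, he]

lemma bRowCount_eq (row : List Int) (n : Nat) (h : n ≤ row.length) :
    bRowCount row (n : Int) 0 n = zcount n row := by
  rw [bRowCount_aux row (n : Int) (by exact_mod_cast h) n 0 le_rfl (by omega)]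
  simp [zcount]

-- chainOK is the IsChain of stepRel
lemma chainOK_iff_chain' (n m : Int) (zs : List Int) :
    chainOK n m zs = true ↔ List.IsChain (stepRel n) (m :: zs) := by
  induction zs generalizing m with
  | nil => simp [chainOK, List.IsChain.singleton]
  | cons z zs ih =>
    simp only [chainOK, Bool.and_eq_true, decide_eq_true_eq, List.isChain_cons_cons, ih]
    unfold stepRel
    constructor
    · rintro ⟨h1, h2⟩; exact ⟨by omega, h2⟩
    · rintro ⟨h1, h2⟩; exact ⟨by omega, h2⟩

lemma stepRel_trans (n : Int) {a b c : Int} (hab : stepRel n a b) (hbc : stepRel n b c) : stepRel n a c := by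
  unfold stepRel at *
  omega

-- Set.ofList is a sublist of its argument
lemma ofList_sublist_aux (xs : List Int) : ∀ acc : List Int, (xs.foldl PySem.Set.add acc).Sublist (acc ++ xs) := by
  induction xs with
  | nil => intro acc; simp
  | cons x xs ih =>
    intro acc
    simp only [List.foldl_cons]
    by_cases hc : x ∈ acc
    · have hadd : PySem.Set.add acc x = acc := by simp [PySem.Set.add, hc]
      rw [hadd]
      exact (ih acc).trans (List.Sublist.append_left (List.sublist_cons_self x xs) acc)
    · have hadd : PySem.Set.add acc x = acc ++ [x] := by simp [PySem.Set.add, hc]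
      rw [hadd]
      have := ih (acc ++ [x])
      simpa using this

-- length equality with the set ↔ Nodup (python: len(xs) == len(set(xs)))
lemma nodup_iff_ofList_length (xs : List Int) :
    xs.Nodup ↔ (PySem.Set.ofList xs).length = xs.length := by
  have hsub : (PySem.Set.ofList xs).Sublist xs := by
    have := ofList_sublist_aux xs []
    simpa [PySem.Set.ofList_eq_foldl] using this
  constructor
  · intro hnd
    have h1 : (PySem.Set.ofList xs).toFinset = xs.toFinset := by
      ext a
      simp [List.mem_toFinset, PySem.Set.mem_ofList]
    calc (PySem.Set.ofList xs).length = (PySem.Set.ofList xs).toFinset.card :=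
          (List.toFinset_card_of_nodup (PySem.Set.nodup_ofList xs)).symm
      _ = xs.toFinset.card := by rw [h1]
      _ = xs.length := List.toFinset_card_of_nodup hnd
  · intro hlen
    have : PySem.Set.ofList xs = xs := hsub.eq_of_length hlen
    rw [← this]
    exact PySem.Set.nodup_ofList xs

-- backward direction of the global reformulation
lemma global_to_chain (n : Int) : ∀ (l : List Int), l.Pairwise (· ≤ ·) →
    (l.filter (fun v => decide (v ≠ n))).Nodup → List.IsChain (stepRel n) l := by
  intro l
  induction l with
  | nil => intro _ _; exact List.isChain_nil
  | cons a t ih =>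
    intro hle hnd
    rw [List.pairwise_cons] at hle
    have htail : List.IsChain (stepRel n) t := by
      apply ih hle.2
      by_cases han : a = n
      · have : (a :: t).filter (fun v => decide (v ≠ n)) = t.filter (fun v => decide (v ≠ n)) := by
          simp [List.filter_cons, han]
        rwa [this] at hnd
      · have : (a :: t).filter (fun v => decide (v ≠ n)) = a :: t.filter (fun v => decide (v ≠ n)) := by
          simp [List.filter_cons, han]
        rw [this, List.nodup_cons] at hnd
        exact hnd.2
    cases t with
    | nil => exact List.IsChain.singleton a
    | cons b t' =>
      rw [List.isChain_cons_cons]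
      refine ⟨?_, htail⟩
      have hab : a ≤ b := hle.1 b (by simp)
      unfold stepRel
      rcases lt_or_eq_of_le hab with h | h
      · exact Or.inl h
      · by_cases han : a = n
        · exact Or.inr ⟨han, by omega⟩
        · exfalso
          have hbn : b ≠ n := by omega
          have hfil : (a :: b :: t').filter (fun v => decide (v ≠ n))
              = a :: (b :: t').filter (fun v => decide (v ≠ n)) := by
            simp [List.filter_cons, han]
          rw [hfil, List.nodup_cons] at hnd
          have : b ∈ (b :: t').filter (fun v => decide (v ≠ n)) :=
            List.mem_filter.mpr ⟨by simp, by simpa using hbn⟩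
          exact hnd.1 (by rwa [h])

-- the global reformulation: Chain' stepRel ↔ nondecreasing + below-n counts distinct
lemma chain'_iff_global (n : Int) (l : List Int) :
    List.IsChain (stepRel n) l ↔
      (l.Pairwise (· ≤ ·) ∧ (l.filter (fun v => decide (v ≠ n))).Nodup) := by
  constructor
  · intro h
    haveI : Trans (stepRel n) (stepRel n) (stepRel n) := ⟨fun hab hbc => stepRel_trans n hab hbc⟩
    have hp : l.Pairwise (stepRel n) := List.isChain_iff_pairwise.mp h
    constructor
    · exact hp.imp (by intro a b hab; unfold stepRel at hab; omega)
    · have hf : (l.filter (fun v => decide (v ≠ n))).Pairwise (stepRel n) := hp.filter _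
      have : (l.filter (fun v => decide (v ≠ n))).Pairwise (· ≠ ·) := by
        apply List.Pairwise.imp_of_mem _ hf
        intro a b ha hb hab
        have ha' : a ≠ n := by simpa using (List.of_mem_filter ha)
        unfold stepRel at hab
        omega
      exact this
  · rintro ⟨hle, hnd⟩
    exact global_to_chain n l hle hnd

-- B evaluated under Pre_
lemma B_eval (r0 : List Int) (rest : List (List Int))
    (hall : ∀ row ∈ (r0 :: rest), r0.length ≤ row.length) :
    verificar_matriz_escada_alt (r0 :: rest) =
      (if ((r0 :: rest).map (zcount r0.length)) = PySem.List.sorted ((r0 :: rest).map (zcount r0.length)) (fun x => x) false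
          ∧ ((((r0 :: rest).map (zcount r0.length)).filter (fun v => decide (v ≠ (r0.length : Int)))).length : Int)
              = ((PySem.Set.ofList (((r0 :: rest).map (zcount r0.length)).filter (fun v => decide (v ≠ (r0.length : Int))))).length : Int)
          ∧ ((r0 :: rest).map (zcount r0.length)).getLast (by simp) ≠ 0
       then "S" else "N") := by
  have hcol : PySem.List.pyGetD (r0 :: rest) 0 ([] : List Int) = r0 :=
    PySem.List.pyGetD_zero_cons r0 rest []
  simp only [verificar_matriz_escada_alt, hcol]
  have hz : (r0 :: rest).foldl (fun acc row => acc ++ [bRowCount row (r0.length : Int) 0 ((r0.length : Int)).toNat]) []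
      = (r0 :: rest).map (zcount r0.length) := by
    rw [PySem.List.foldl_append_singleton_eq_map]
    simp only [List.nil_append]
    apply List.map_congr_left
    intro row hm
    rw [show ((r0.length : Int)).toNat = r0.length by omega]
    exact bRowCount_eq row r0.length (hall row hm)
  rw [hz]
  have hne : (r0 :: rest).map (zcount r0.length) ≠ [] := by simp
  rw [PySem.List.pyGetD, PySem.List.pyGet?_neg_one, List.getLast?_eq_some_getLast hne]
  simp only [Option.getD_some]
  rfl

-- ===== VERDICT (by name: the statement is the Claim_ definition above) =====
theorem verificar_matriz_escada_spec : Claim_equal_verificar_matriz_escada := by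
  intro matriz _ hpre
  obtain ⟨hne, hall0⟩ := hpre
  obtain ⟨r0, rest, rfl⟩ := List.exists_cons_of_ne_nil hne
  have hall : ∀ row ∈ (r0 :: rest), r0.length ≤ row.length := by
    intro row hm
    simpa using hall0 row hm
  show verificar_matriz_escada (r0 :: rest) = verificar_matriz_escada_alt (r0 :: rest)
  rw [A_eval r0 rest hall, B_eval r0 rest hall]
  set n : Int := (r0.length : Int) with hn
  set z0 : Int := zcount r0.length r0 with hz0
  set zs : List Int := rest.map (zcount r0.length) with hzs
  have hmap : (r0 :: rest).map (zcount r0.length) = z0 :: zs := by simp [hz0, hzs]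
  rw [foldlTrue]
  simp only [hmap]
  have hchain : chainOK n z0 zs = true ↔
      ((z0 :: zs) = PySem.List.sorted (z0 :: zs) (fun x => x) false
        ∧ (((z0 :: zs).filter (fun v => decide (v ≠ n))).length : Int)
            = ((PySem.Set.ofList ((z0 :: zs).filter (fun v => decide (v ≠ n)))).length : Int)) := by
    rw [chainOK_iff_chain', chain'_iff_global]
    constructor
    · rintro ⟨hle, hnd⟩
      refine ⟨(PySem.List.sorted_eq_self_of_pairwise (z0 :: zs) (fun x => x) hle).symm, ?_⟩
      have := (nodup_iff_ofList_length _).mp hnd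
      omega
    · rintro ⟨hsort, hlen⟩
      refine ⟨?_, (nodup_iff_ofList_length _).mpr (by omega)⟩
      rw [hsort]
      exact PySem.List.sorted_pairwise (z0 :: zs) (fun x => x)
  by_cases hC : chainOK n z0 zs = true
  · rw [if_pos hC]
    rcases hchain.mp hC with ⟨h1, h2⟩
    by_cases hL : (z0 :: zs).getLast (by simp) ≠ 0
    · rw [if_pos (by simpa using hL), if_pos ⟨h1, h2, hL⟩]
    · rw [if_neg (by simpa using hL), if_neg (by tauto)]
  · rw [if_neg hC, if_neg (show ¬ ((0 : Int) ≠ 0) by omega)]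
    rw [if_neg (by intro h; exact hC (hchain.mpr ⟨h.1, h.2.1⟩))]
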